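-- pv_equiv track=rewrite | github.com/azeemtech-dev/Python-cs50 | HarvardPython/problemsets/pset2/vanity.py | valid_number_usage
-- ===== SOURCE A (Python) =====
-- def valid_number_usage(s):
--     num_started = False
--     for i, c in enumerate(s):
--         if c.isdigit():
--             if i == 0:
--                 return False  # Number at the start
--             if not num_started:
--                 if c == '0':
--                     return False  # First number is '0'
--                 num_started = True
--         elif num_started:
--             return False  # Letter after number
--     return True
-- ===== SOURCE B (Python) =====
-- def valid_number_usage(s):
--     # Phase 1: find the index of the first digit.
--     first = None
--     for k, ch in enumerate(s):
--         if ch.isdigit():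
--             first = k
--             break
--     if first is None:
--         return True
--     # Phase 2: boundary checks, then validate the whole suffix.
--     if first == 0 or s[first] == '0':
--         return False
--     return all(ch.isdigit() for ch in s[first:])
-- ===== Notes on version B (the rewrite author's own statement) =====
-- stated objective: alternative
-- what changed: Replaces A's single-pass state machine (num_started flag with early returns) by a two-phase decomposition: find the index of the first digit, then boundary-check it and validate the remaining suffix with all(...).
import Mathlib
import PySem

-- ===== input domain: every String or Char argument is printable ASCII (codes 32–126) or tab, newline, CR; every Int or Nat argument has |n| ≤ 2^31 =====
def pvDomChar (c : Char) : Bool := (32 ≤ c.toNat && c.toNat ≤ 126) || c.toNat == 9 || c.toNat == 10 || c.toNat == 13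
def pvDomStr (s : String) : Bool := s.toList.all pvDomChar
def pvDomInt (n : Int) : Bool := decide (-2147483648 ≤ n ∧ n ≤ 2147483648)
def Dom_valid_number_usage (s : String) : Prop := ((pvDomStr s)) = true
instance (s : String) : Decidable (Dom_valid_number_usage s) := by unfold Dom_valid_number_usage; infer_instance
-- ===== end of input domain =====

-- B replaces A's single-pass state machine by a two-phase decomposition (find first digit index, then validate suffix); alternative, same cost.


-- ===== PORT A =====
-- state machine over the characters with the running index i and the num_started flag
def vnuLoopA : List Char → Nat → Bool → Bool
  | [], _, _ => true
  | c :: rest, i, numStarted =>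
    if PySem.Chars.isdigit c then
      if i == 0 then false
      else if !numStarted then
        if c == '0' then false else vnuLoopA rest (i + 1) true
      else vnuLoopA rest (i + 1) numStarted
    else if numStarted then false
    else vnuLoopA rest (i + 1) numStarted

def valid_number_usage (s : String) : Bool :=
  vnuLoopA s.toList 0 false

-- ===== PORT B =====
-- phase 1: index of the first digit (the for-loop with break); some 0-based index, or none
def vnuFindDigit : List Char → Option Nat
  | [] => none
  | c :: rest =>
    if PySem.Chars.isdigit c then some 0 else (vnuFindDigit rest).map (· + 1)

def valid_number_usage_alt (s : String) : Bool :=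
  let cs := s.toList
  match vnuFindDigit cs with
  | none => true
  | some first =>
    if first == 0 || PySem.List.pyGet? cs (first : Int) == some '0' then false
    else (PySem.List.slice cs (some (first : Int)) none).all PySem.Chars.isdigit

-- ===== PRECONDITION & SPEC =====
def Spec_valid_number_usage (s : String) (out : Bool) : Prop := out = valid_number_usage_alt s
instance (s : String) (out : Bool) : Decidable (Spec_valid_number_usage s out) := by unfold Spec_valid_number_usage; infer_instance

-- ===== CLAIM (what is proved, stated in full; the proofs are below) =====
def Claim_equal_valid_number_usage : Prop := ∀ (s : String), Dom_valid_number_usage s → Spec_valid_number_usage s (valid_number_usage s)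

-- ===== LEMMAS AND PROOFS =====

-- once the number has started, A accepts exactly an all-digit remainder (index irrelevant for i ≥ 1)
theorem vnuLoopA_true (cs : List Char) (i : Nat) (hi : 1 ≤ i) :
    vnuLoopA cs i true = cs.all PySem.Chars.isdigit := by
  induction cs generalizing i with
  | nil => simp [vnuLoopA]
  | cons c rest ih =>
    simp only [vnuLoopA, List.all_cons]
    have : ¬ (i == 0) = true := by simp; omega
    by_cases hd : PySem.Chars.isdigit c <;> simp [hd, this, ih (i + 1) (by omega)]

-- the small characterisation both sides reduce to once the head is known safe
def vnuG : List Char → Bool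
  | [] => true
  | c :: rest =>
    if PySem.Chars.isdigit c then
      (if c == '0' then false else rest.all PySem.Chars.isdigit)
    else vnuG rest

theorem vnuLoopA_false (cs : List Char) (i : Nat) (hi : 1 ≤ i) :
    vnuLoopA cs i false = vnuG cs := by
  induction cs generalizing i with
  | nil => rfl
  | cons c rest ih =>
    simp only [vnuLoopA, vnuG]
    have h0 : ¬ (i == 0) = true := by simp; omega
    by_cases hd : PySem.Chars.isdigit c
    · by_cases hz : c == '0' <;>
        simp [hd, hz, h0, vnuLoopA_true rest (i + 1) (by omega)]
    · simp [hd, ih (i + 1) (by omega)]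

-- B's core (after the head is known to be a non-digit) also equals vnuG
theorem vnuAltCore (cs : List Char) :
    (match vnuFindDigit cs with
     | none => true
     | some j =>
       if PySem.List.pyGet? cs (j : Int) == some '0' then false
       else (PySem.List.slice cs (some (j : Int)) none).all PySem.Chars.isdigit)
    = vnuG cs := by
  induction cs with
  | nil => rfl
  | cons c rest ih =>
    by_cases hd : PySem.Chars.isdigit c
    · simp only [vnuFindDigit, hd, if_pos, vnuG]
      by_cases hz : c == '0' <;> simp [hz, hd]
    · simp only [vnuFindDigit, hd, Bool.false_eq_true, if_false, vnuG]
      cases hf : vnuFindDigit rest with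
      | none => rw [hf] at ih; simp_all
      | some j =>
        rw [hf] at ih
        simp only [Option.map_some] at ih ⊢
        have hsl : PySem.List.slice (c :: rest) (some ((j : Int) + 1)) none
            = List.drop j rest := by
          rw [show ((j : Int) + 1) = ((j + 1 : Nat) : Int) by push_cast; ring,
            PySem.List.slice_from_natCast, List.drop_succ_cons]
        simp only [PySem.List.pyGet?_natCast, PySem.List.slice_from_natCast,
          Nat.cast_add, Nat.cast_one, hsl] at ih ⊢
        simpa [List.getElem?_cons_succ] using ih

-- ===== VERDICT (by name: the statement is the Claim_ definition above) =====
theorem valid_number_usage_spec : Claim_equal_valid_number_usage := by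
  intro s _
  unfold Spec_valid_number_usage valid_number_usage valid_number_usage_alt
  cases hcs : s.toList with
  | nil => rfl
  | cons c rest =>
    by_cases hd : PySem.Chars.isdigit c
    · simp [vnuLoopA, vnuFindDigit, hd]
    · simp only [vnuLoopA, hd, Bool.false_eq_true, if_false, beq_self_eq_true, if_pos]
      rw [vnuLoopA_false rest 1 le_rfl, ← vnuAltCore rest]
      simp only [vnuFindDigit, hd, Bool.false_eq_true, if_false]
      cases hf : vnuFindDigit rest with
      | none => simp
      | some j =>
        simp only [Option.map_some]
        have hsl : PySem.List.slice (c :: rest) (some ((j : Int) + 1)) none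
            = List.drop j rest := by
          rw [show ((j : Int) + 1) = ((j + 1 : Nat) : Int) by push_cast; ring,
            PySem.List.slice_from_natCast, List.drop_succ_cons]
        simp [PySem.List.pyGet?_natCast, PySem.List.slice_from_natCast, hsl]
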